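-- pv_equiv track=rewrite | github.com/PeterSzobonya/school | impprog/almaZHGyak/2/py/takeBy.py | takeFilter
-- ===== SOURCE A (Python) =====
-- def takeFilter(t,n2):
--     t2=[]
--     j=0
--     i=0
--
--     while i<len(t) and j<n2:
--         if t[i] >= 0:
--             t2.insert(j,t[i])
--             j=j+1
--         i=i+1
--
--     if j<n2:
--         while j<n2:
--             t2.insert(j,0)
--             j=j+1
--
--     return t2
-- ===== SOURCE B (Python) =====
-- def takeFilter(t, n2):
--     n = max(n2, 0)
--     res = [x for x in t if x >= 0][:n]
--     return res + [0] * (n - len(res))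
-- ===== Notes on version B (the rewrite author's own statement) =====
-- stated objective: simpler
-- what changed: Replaces the two index-tracking while-loops with filter + clamped slice + closed-form zero padding via list multiplication (C-level comprehension/slice instead of per-element insert and index bookkeeping).
import Mathlib
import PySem

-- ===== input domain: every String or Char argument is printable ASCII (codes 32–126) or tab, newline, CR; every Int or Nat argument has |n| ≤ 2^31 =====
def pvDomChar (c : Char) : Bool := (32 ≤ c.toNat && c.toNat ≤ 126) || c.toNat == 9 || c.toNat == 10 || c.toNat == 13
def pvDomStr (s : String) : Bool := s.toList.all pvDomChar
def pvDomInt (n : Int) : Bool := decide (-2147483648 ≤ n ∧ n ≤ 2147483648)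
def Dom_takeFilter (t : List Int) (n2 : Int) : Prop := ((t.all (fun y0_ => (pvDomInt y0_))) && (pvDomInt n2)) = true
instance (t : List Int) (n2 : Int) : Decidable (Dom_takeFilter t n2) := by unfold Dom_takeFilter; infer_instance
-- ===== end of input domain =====

-- B replaces A's two index-tracking while-loops by filter + clamped slice + closed-form zero padding (objective: simpler).
-- ===== PORT A =====
-- first while loop: i walks t, j counts elements appended (t2.insert(j, x) with j = len(t2) is an append)
def takeFilterLoopA (t : List Int) (n2 : Int) (j : Int) (t2 : List Int) : Int × List Int :=
  match t with
  | [] => (j, t2)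
  | x :: rest =>
    if j < n2 then
      if x ≥ 0 then takeFilterLoopA rest n2 (j + 1) (t2 ++ [x])
      else takeFilterLoopA rest n2 j t2
    else (j, t2)

-- padding while loop: t2.insert(j, 0) with j = len(t2) is an append
def padLoopA (n2 : Int) (j : Int) (t2 : List Int) : List Int :=
  if j < n2 then padLoopA n2 (j + 1) (t2 ++ [0]) else t2
termination_by (n2 - j).toNat
decreasing_by omega

def takeFilter (t : List Int) (n2 : Int) : List Int :=
  let r := takeFilterLoopA t n2 0 []
  if r.1 < n2 then padLoopA n2 r.1 r.2 else r.2

-- ===== PORT B =====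
def takeFilter_alt (t : List Int) (n2 : Int) : List Int :=
  let n := max n2 0
  let res := (t.filter (fun x => x ≥ 0)).take n.toNat
  res ++ List.replicate (n.toNat - res.length) 0

-- ===== PRECONDITION & SPEC =====
def Spec_takeFilter (t : List Int) (n2 : Int) (out : List Int) : Prop := out = takeFilter_alt t n2
instance (t : List Int) (n2 : Int) (out : List Int) : Decidable (Spec_takeFilter t n2 out) := by unfold Spec_takeFilter; infer_instance

-- ===== CLAIM (what is proved, stated in full; the proofs are below) =====
def Claim_equal_takeFilter : Prop := ∀ (t : List Int) (n2 : Int), Dom_takeFilter t n2 → Spec_takeFilter t n2 (takeFilter t n2)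

-- ===== LEMMAS AND PROOFS =====

-- ===== VERDICT (by name: the statement is the Claim_ definition above) =====
lemma takeFilterLoopA_eq (t : List Int) (n2 j : Int) (acc : List Int) :
    takeFilterLoopA t n2 j acc =
      (j + ((t.filter (fun x => x ≥ 0)).take (n2 - j).toNat).length,
       acc ++ (t.filter (fun x => x ≥ 0)).take (n2 - j).toNat) := by
  induction t generalizing j acc with
  | nil => simp [takeFilterLoopA]
  | cons x rest ih =>
    by_cases hj : j < n2
    · by_cases hx : x ≥ 0
      · have hn : (n2 - j).toNat = (n2 - (j + 1)).toNat + 1 := by omega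
        simp [takeFilterLoopA, hj, hx, ih, hn, List.take_succ_cons]
        omega
      · simp [takeFilterLoopA, hj, hx, ih]
    · have hn : (n2 - j).toNat = 0 := by omega
      simp [takeFilterLoopA, hj, hn]

lemma padLoopA_eq (n2 j : Int) (t2 : List Int) :
    padLoopA n2 j t2 = t2 ++ List.replicate (n2 - j).toNat 0 := by
  by_cases hj : j < n2
  · have hn : (n2 - j).toNat = (n2 - (j + 1)).toNat + 1 := by omega
    rw [padLoopA, if_pos hj, padLoopA_eq n2 (j + 1)]
    simp [hn, List.replicate_succ]
  · have hn : (n2 - j).toNat = 0 := by omega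
    rw [padLoopA, if_neg hj]
    simp [hn]
termination_by (n2 - j).toNat
decreasing_by omega

theorem takeFilter_spec : Claim_equal_takeFilter := by
  intro t n2 _
  unfold Spec_takeFilter takeFilter takeFilter_alt
  dsimp only
  rw [takeFilterLoopA_eq]
  generalize t.filter (fun x => x ≥ 0) = F
  have hmax : (n2 - 0).toNat = (max n2 0).toNat := by omega
  rw [hmax]
  have hlen : (F.take (max n2 0).toNat).length = min (max n2 0).toNat F.length :=
    List.length_take
  by_cases h : (0 : Int) + ((F.take (max n2 0).toNat).length : Int) < n2
  · rw [if_pos h, padLoopA_eq]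
    congr 2
    omega
  · rw [if_neg h]
    have hz : (max n2 0).toNat - (F.take (max n2 0).toNat).length = 0 := by omega
    rw [hz, List.replicate_zero, List.append_nil]
    rfl
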